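-- pv_equiv track=rewrite | github.com/bousquetfrederic/buy_ovh | m/monitor.py | compress_fnq_list
-- ===== SOURCE A (Python) =====
-- from collections import defaultdict
--
-- def compress_fnq_list(lines):
--     fqns_4 = []
--     passthrough = []
--     for line in lines:
--         parts = line.split(".")
--         if len(parts) == 4:
--             fqns_4.append(tuple(parts))
--         else:
--             passthrough.append(line)
--     # Group by a
--     groups_a = defaultdict(list)
--     for a, b, c, d in fqns_4:
--         groups_a[a].append((b, c, d))
--     result = []
--     for a, bcd_list in groups_a.items():
--         # Group by b
--         groups_b = defaultdict(list)
--         for b, c, d in bcd_list: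
--             groups_b[b].append((c, d))
--         # Pour chaque b, on construit sa structure c/d avec Option B
--         b_struct = {}  # b -> list of (c_group_tuple, dset_tuple)
--         for b, cd_list in groups_b.items():
--             c_to_ds = defaultdict(set)
--             for c, d in cd_list:
--                 c_to_ds[c].add(d)
--             # Option B sur c/d : regrouper les c qui ont le même set de d
--             dset_to_cs = defaultdict(list)
--             for c, dset in c_to_ds.items():
--                 dset_to_cs[frozenset(dset)].append(c)
--             struct = []
--             for dset, cs in dset_to_cs.items():
--                 cs_sorted = tuple(sorted(cs))
--                 ds_sorted = tuple(sorted(dset))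
--                 struct.append((cs_sorted, ds_sorted))
--             struct.sort()
--             b_struct[b] = struct
--         # Maintenant, on regroupe les b qui ont la même structure c/d
--         struct_to_bs = defaultdict(list)
--         for b, struct in b_struct.items():
--             key = tuple(struct)  # hashable
--             struct_to_bs[key].append(b)
--         # On produit les lignes
--         for struct, bs in struct_to_bs.items():
--             bs_sorted = sorted(bs)
--             if len(bs_sorted) == 1:
--                 b_part = bs_sorted[0]
--             else:
--                 b_part = "(" + "|".join(bs_sorted) + ")"
--             for c_group, dset in struct:
--                 if len(c_group) == 1:
--                     c_part = c_group[0]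
--                 else:
--                     c_part = "(" + "|".join(c_group) + ")"
--
--                 if len(dset) == 1:
--                     d_part = dset[0]
--                 else:
--                     d_part = "(" + "|".join(dset) + ")"
--                 result.append(".".join([a, b_part, c_part, d_part]))
--     # On rajoute les lignes non compressées (≠ 4 niveaux)
--     result.extend(passthrough)
--     return result
-- ===== SOURCE B (Python) =====
-- def compress_fnq_list(lines):
--     quads = [q for q in (tuple(line.split(".")) for line in lines) if len(q) == 4]
--
--     def dedup(xs):
--         seen = []
--         for x in xs:
--             if x not in seen:
--                 seen.append(x)
--         return seen
--
--     def render(xs):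
--         return xs[0] if len(xs) == 1 else "(" + "|".join(xs) + ")"
--
--     def structure(cds):
--         cmap = [(c, tuple(sorted({d for (c2, d) in cds if c2 == c})))
--                 for c in dedup([c for (c, _) in cds])]
--         return sorted((tuple(sorted([c for (c, ds) in cmap if ds == dset])), dset)
--                       for dset in dedup([ds for (_, ds) in cmap]))
--
--     out = []
--     for a in dedup([q[0] for q in quads]):
--         sub = [(b, c, d) for (a2, b, c, d) in quads if a2 == a]
--         structs = [(b, structure([(c, d) for (b2, c, d) in sub if b2 == b]))
--                    for b in dedup([b for (b, _, _) in sub])]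
--         out += [".".join([a,
--                           render(sorted([b for (b, s) in structs if s == st])),
--                           render(cg), render(ds)])
--                 for st in dedup([s for (_, s) in structs])
--                 for (cg, ds) in st]
--     return out + [line for line in lines if len(line.split(".")) != 4]
-- ===== Notes on version B (the rewrite author's own statement) =====
-- stated objective: simpler
-- what changed: Replaces A's six defaultdict/dict accumulation passes with declarative grouping: keys are deduplicated in first-occurrence order and each group is obtained by filtering, so the whole result is built by nested comprehensions (no dicts, no mutable accumulators).
import Mathlib
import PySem

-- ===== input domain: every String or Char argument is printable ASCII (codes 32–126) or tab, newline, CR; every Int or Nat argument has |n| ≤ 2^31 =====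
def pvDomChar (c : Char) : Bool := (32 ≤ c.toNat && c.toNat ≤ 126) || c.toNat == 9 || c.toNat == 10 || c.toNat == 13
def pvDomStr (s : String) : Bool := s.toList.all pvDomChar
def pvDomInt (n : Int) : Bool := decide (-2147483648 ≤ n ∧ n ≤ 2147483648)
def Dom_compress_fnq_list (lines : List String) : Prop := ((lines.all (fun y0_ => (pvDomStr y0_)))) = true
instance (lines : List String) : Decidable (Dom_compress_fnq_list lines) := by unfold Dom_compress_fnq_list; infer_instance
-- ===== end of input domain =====

-- B groups the four-part lines by deduplicated keys + filtering comprehensions instead of A's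
-- defaultdict/dict accumulation passes (objective: simpler; return value only, no mutation involved).

-- ===== PORT A =====
-- shared parsing helpers: line.split(".") (sep is the non-empty literal ".", so split? is never none),
-- and tuple(parts) when len(parts) == 4
def pvParts (line : String) : List String := (PySem.Str.split? line ".").getD []

def pvQuad? : List String → Option (String × String × String × String)
  | [a, b, c, d] => some (a, b, c, d)
  | _ => none


-- A-side helper: the per-b structure block of A (c_to_ds / dset_to_cs / struct, then struct.sort())
def pvAStruct (cd_list : List (String × String)) : List (List String × List String) :=
  let c_to_ds := cd_list.foldl (fun d p => d.modify p.1 [] (fun s => PySem.Set.add s p.2)) PySem.Dict.empty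
  let dset_to_cs := c_to_ds.items.foldl
      (fun d p => d.modify (PySem.List.sorted p.2 (fun x => x)) [] (fun v => v ++ [p.1]))
      PySem.Dict.empty
  let struct := dset_to_cs.items.foldl (fun stl p =>
      stl ++ [(PySem.List.sorted p.2 (fun x => x), PySem.List.sorted p.1 (fun x => x))]) []
  PySem.List.sorted2 struct Prod.fst Prod.snd

-- literal transliteration of A: append-partition into fqns_4/passthrough, then the nested
-- defaultdict groupings; frozenset(dset) is modelled canonically as the sorted list of its elements
-- (its only uses in A are dict-key equality and sorted(dset), both exact under this model)
def compress_fnq_list (lines : List String) : List String :=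
  let fp := lines.foldl (fun (st : List (String × String × String × String) × List String) line =>
      match pvQuad? (pvParts line) with
      | some q => (st.1 ++ [q], st.2)
      | none   => (st.1, st.2 ++ [line])) ([], [])
  let groups_a := fp.1.foldl (fun d q => d.modify q.1 [] (fun v => v ++ [q.2])) PySem.Dict.empty
  let result := groups_a.items.foldl (fun result ap =>
    let groups_b := ap.2.foldl (fun d t => d.modify t.1 [] (fun v => v ++ [t.2])) PySem.Dict.empty
    let b_struct := groups_b.items.foldl (fun bs bp =>
        bs.insert bp.1 (pvAStruct bp.2)) PySem.Dict.empty
    let struct_to_bs := b_struct.items.foldl (fun d p => d.modify p.2 [] (fun v => v ++ [p.1])) PySem.Dict.empty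
    struct_to_bs.items.foldl (fun result sp =>
      let bs_sorted := PySem.List.sorted sp.2 (fun x => x)
      let b_part := if bs_sorted.length = 1 then PySem.List.pyGetD bs_sorted 0 ""
                    else "(" ++ PySem.Str.join "|" bs_sorted ++ ")"
      sp.1.foldl (fun result cd =>
        let c_part := if cd.1.length = 1 then PySem.List.pyGetD cd.1 0 ""
                      else "(" ++ PySem.Str.join "|" cd.1 ++ ")"
        let d_part := if cd.2.length = 1 then PySem.List.pyGetD cd.2 0 ""
                      else "(" ++ PySem.Str.join "|" cd.2 ++ ")"
        result ++ [PySem.Str.join "." [ap.1, b_part, c_part, d_part]]) result) result) []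
  result ++ fp.2

-- ===== PORT B =====
-- Source B's hand-written dedup loop (first occurrences kept, in order)
def pvDedupB {α : Type} [BEq α] (xs : List α) : List α :=
  xs.foldl (fun seen x => if seen.contains x then seen else seen ++ [x]) []

-- Source B's render helper
def pvRender (xs : List String) : String :=
  if xs.length = 1 then PySem.List.pyGetD xs 0 "" else "(" ++ PySem.Str.join "|" xs ++ ")"

-- Source B's structure helper: c -> sorted d-set, then c's grouped by equal d-set, sorted
def pvStructure (cds : List (String × String)) : List (List String × List String) :=
  let cmap := (pvDedupB (cds.map (·.1))).map (fun c =>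
      (c, PySem.List.sorted (PySem.Set.ofList ((cds.filter (fun p => p.1 == c)).map (·.2))) (fun x => x)))
  PySem.List.sorted2
    ((pvDedupB (cmap.map (·.2))).map (fun dset =>
        (PySem.List.sorted ((cmap.filter (fun p => p.2 == dset)).map (·.1)) (fun x => x), dset)))
    Prod.fst Prod.snd

-- literal transliteration of Source B: nested dedup+filter comprehensions
def compress_fnq_list_alt (lines : List String) : List String :=
  let quads := lines.filterMap (fun line => pvQuad? (pvParts line))
  let out := (pvDedupB (quads.map (·.1))).flatMap (fun a =>
    let sub := (quads.filter (fun q => q.1 == a)).map (·.2)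
    let structs := (pvDedupB (sub.map (·.1))).map (fun b =>
        (b, pvStructure ((sub.filter (fun t => t.1 == b)).map (·.2))))
    (pvDedupB (structs.map (·.2))).flatMap (fun st =>
        let bpart := pvRender (PySem.List.sorted ((structs.filter (fun p => p.2 == st)).map (·.1)) (fun x => x))
        st.map (fun p => PySem.Str.join "." [a, bpart, pvRender p.1, pvRender p.2])))
  out ++ lines.filter (fun line => (pvParts line).length ≠ 4)

-- ===== PRECONDITION & SPEC =====
def Spec_compress_fnq_list (lines : List String) (out : List String) : Prop := out = compress_fnq_list_alt lines
instance (lines : List String) (out : List String) : Decidable (Spec_compress_fnq_list lines out) := by unfold Spec_compress_fnq_list; infer_instance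

-- ===== CLAIM (what is proved, stated in full; the proofs are below) =====
def Claim_equal_compress_fnq_list : Prop := ∀ (lines : List String), Dom_compress_fnq_list lines → Spec_compress_fnq_list lines (compress_fnq_list lines)

-- ===== LEMMAS AND PROOFS =====

-- a quadruple is extracted exactly from 4-part splits
lemma pvQuad_none_iff (ps : List String) : pvQuad? ps = none ↔ ps.length ≠ 4 := by
  rcases ps with _ | ⟨a, _ | ⟨b, _ | ⟨c, _ | ⟨d, _ | e⟩⟩⟩⟩ <;> simp [pvQuad?]

-- A's first loop partitions lines into the 4-part quadruples and the passthrough lines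
lemma pvPartition (lines : List String) (acc1 : List (String × String × String × String))
    (acc2 : List String) :
    lines.foldl (fun st line => match pvQuad? (pvParts line) with
        | some q => (st.1 ++ [q], st.2)
        | none   => (st.1, st.2 ++ [line])) (acc1, acc2)
    = (acc1 ++ lines.filterMap (fun line => pvQuad? (pvParts line)),
       acc2 ++ lines.filter (fun line => (pvParts line).length ≠ 4)) := by
  induction lines generalizing acc1 acc2 with
  | nil => simp
  | cons l t ih =>
    cases hq : pvQuad? (pvParts l) with
    | none =>
      have h4 : (pvParts l).length ≠ 4 := (pvQuad_none_iff _).mp hq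
      simp [hq, h4, ih]
    | some q =>
      have h4 : ¬ (pvParts l).length ≠ 4 := fun hne => by
        rw [(pvQuad_none_iff _).mpr hne] at hq; cases hq
      simp [hq, h4, ih]

-- a defaultdict(list) append loop, as items: deduplicated keys paired with the filtered values
lemma pvGroupItems {κ β ν : Type} [BEq κ] [LawfulBEq κ] (l : List β) (key : β → κ) (val : β → ν) :
    (l.foldl (fun d x => d.modify (key x) ([] : List ν) (fun v => v ++ [val x])) PySem.Dict.empty).items
    = (PySem.List.dedup (l.map key)).map (fun k => (k, (l.filter (fun x => key x == k)).map val)) := by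
  have hnd : (l.foldl (fun d x => d.modify (key x) ([] : List ν) (fun v => v ++ [val x])) PySem.Dict.empty).keys.Nodup :=
    PySem.Dict.nodup_keys_foldl_modify_key l key [] (fun _ x v => v ++ [val x]) PySem.Dict.empty
      (by simp [PySem.Dict.keys_empty])
  have hkeys := PySem.Dict.keys_foldl_modify_key l key ([] : List ν) (fun _ x v => v ++ [val x]) PySem.Dict.empty
  rw [PySem.Dict.items_eq_map_keys _ hnd ([] : List ν), hkeys, PySem.Dict.keys_empty]
  have hupd : PySem.Set.update ([] : PySem.Set κ) (l.map key) = PySem.List.dedup (l.map key) := by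
    rw [PySem.List.dedup_eq_ofList]; rfl
  rw [hupd]
  apply List.map_congr_left
  intro k _
  have hfold : (l.foldl (fun d x => d.modify (key x) ([] : List ν) (fun v => v ++ [val x])) PySem.Dict.empty)
      = ((l.map (fun x => (key x, val x))).foldl (fun d p => d.modify p.1 ([] : List ν) (fun v => v ++ [p.2])) PySem.Dict.empty) := by
    rw [List.foldl_map]
  rw [hfold, PySem.Dict.getD_foldl_modify_append]
  simp [PySem.Dict.getD_empty, List.filter_map, List.map_map, Function.comp_def]

-- a defaultdict(set) add loop: the value at c collects the d's filed under c, as a Python set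
lemma pvSetFoldGetD {κ α : Type} [BEq κ] [LawfulBEq κ] [BEq α] (l : List (κ × α))
    (d : PySem.Dict κ (PySem.Set α)) (c : κ) :
    (l.foldl (fun d p => d.modify p.1 ([] : PySem.Set α) (fun s => PySem.Set.add s p.2)) d).getD c []
    = PySem.Set.update (d.getD c []) ((l.filter (fun p => p.1 == c)).map (·.2)) := by
  induction l generalizing d with
  | nil => simp [PySem.Set.update_nil]
  | cons p t ih =>
    simp only [List.foldl_cons, List.filter_cons]
    by_cases h : p.1 = c
    · rw [ih]
      simp [h, PySem.Dict.getD_modify_self, PySem.Set.update]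
    · rw [ih, PySem.Dict.getD_modify_of_ne _ _ _ (fun hh => h hh.symm)]
      simp [h]

lemma pvSetGroupItems {κ α : Type} [BEq κ] [LawfulBEq κ] [BEq α] (l : List (κ × α)) :
    (l.foldl (fun d p => d.modify p.1 ([] : PySem.Set α) (fun s => PySem.Set.add s p.2)) PySem.Dict.empty).items
    = (PySem.List.dedup (l.map (·.1))).map
        (fun c => (c, PySem.Set.ofList ((l.filter (fun p => p.1 == c)).map (·.2)))) := by
  have hnd : (l.foldl (fun d p => d.modify p.1 ([] : PySem.Set α) (fun s => PySem.Set.add s p.2)) PySem.Dict.empty).keys.Nodup :=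
    PySem.Dict.nodup_keys_foldl_modify_key l (fun p => p.1) [] (fun _ p s => PySem.Set.add s p.2) PySem.Dict.empty
      (by simp [PySem.Dict.keys_empty])
  have hkeys := PySem.Dict.keys_foldl_modify_key l (fun p => p.1) ([] : PySem.Set α) (fun _ p s => PySem.Set.add s p.2) PySem.Dict.empty
  rw [PySem.Dict.items_eq_map_keys _ hnd ([] : PySem.Set α), hkeys, PySem.Dict.keys_empty]
  have hupd : PySem.Set.update ([] : PySem.Set κ) (l.map (·.1)) = PySem.List.dedup (l.map (·.1)) := by
    rw [PySem.List.dedup_eq_ofList]; rfl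
  rw [hupd]
  apply List.map_congr_left
  intro k _
  rw [pvSetFoldGetD]
  simp [PySem.Dict.getD_empty]
  rfl

-- a plain dict filled over distinct fresh keys just tabulates
lemma pvInsertFreshDedup {κ μ ν : Type} [BEq κ] [LawfulBEq κ] (xs : List κ) (g : κ → μ) (h : κ × μ → ν) :
    (((PySem.List.dedup xs).map (fun b => (b, g b))).foldl
        (fun d bp => d.insert bp.1 (h bp)) PySem.Dict.empty).items
    = (PySem.List.dedup xs).map (fun b => (b, h (b, g b))) := by
  have := PySem.Dict.items_foldl_insert_fresh ((PySem.List.dedup xs).map (fun b => (b, g b)))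
      (fun bp => bp.1) h PySem.Dict.empty
      (fun a _ => PySem.Dict.contains_empty _)
      (by simp [List.map_map, Function.comp_def, ])
  simpa [List.map_map, Function.comp_def] using this

lemma pvDedupB_eq {α : Type} [BEq α] (xs : List α) : pvDedupB xs = PySem.List.dedup xs := by
  rw [PySem.List.dedup_eq_ofList]; rfl

-- A's per-b structure block computes B's structure helper
lemma pvAStruct_eq (cd : List (String × String)) : pvAStruct cd = pvStructure cd := by
  unfold pvAStruct pvStructure
  simp only [pvSetGroupItems, pvGroupItems, PySem.List.foldl_append_singleton_eq_map,
    List.nil_append, pvDedupB_eq, List.map_map, List.filter_map, Function.comp_def]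
  congr 1
  apply List.map_congr_left
  intro k hk
  rw [PySem.List.mem_dedup] at hk
  obtain ⟨c, hc, rfl⟩ := List.mem_map.mp hk
  simp [PySem.List.sorted_sorted]

lemma pvMain (lines : List String) : compress_fnq_list lines = compress_fnq_list_alt lines := by
  unfold compress_fnq_list compress_fnq_list_alt
  simp only [pvPartition, List.nil_append]
  simp only [PySem.List.foldl_append_singleton_eq_map, PySem.List.foldl_append_eq_flatMap,
    List.nil_append, pvGroupItems, pvInsertFreshDedup, pvAStruct_eq, pvDedupB_eq, pvRender,
    List.flatMap_map, List.map_map, Function.comp_def]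

-- ===== VERDICT (by name: the statement is the Claim_ definition above) =====
theorem compress_fnq_list_spec : Claim_equal_compress_fnq_list := by
  intro lines _
  unfold Spec_compress_fnq_list
  exact pvMain lines
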